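-- pv_equiv track=rewrite | github.com/JakZab/Dungeon-Crawler | game.py | roomCreator
-- ===== SOURCE A (Python) =====
-- def roomCreator(x: int,y:int):
--     "Creates a list[][] that's x spaces wide and y spaces high"
--     room=[]
--     for i in range(y):
--         temp=[]
--         for j in range(x):
--             if j==0 or j==x-1 or i==0 or i==y-1:
--                 temp.append("X")
--             else:
--                 temp.append(" ")
--         room.append(temp)
--     return room
-- ===== SOURCE B (Python) =====
-- def roomCreator(x: int, y: int):
--     "Creates a list[][] that's x spaces wide and y spaces high"
--     if y <= 0:
--         return []
--     border = ["X"] * x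
--     if x >= 2:
--         interior = ["X"] + [" "] * (x - 2) + ["X"]
--     else:
--         interior = border
--     return [list(border) if i == 0 or i == y - 1 else list(interior) for i in range(y)]
-- ===== Notes on version B (the rewrite author's own statement) =====
-- stated objective: simpler
-- what changed: Replaces the per-cell nested loop with four-way branching by row-level construction: precompute the border row ['X']*x and the interior row ['X']+[' ']*(x-2)+['X'] (border when x<2) once, then emit a copy of the right row per i.
import Mathlib
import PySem

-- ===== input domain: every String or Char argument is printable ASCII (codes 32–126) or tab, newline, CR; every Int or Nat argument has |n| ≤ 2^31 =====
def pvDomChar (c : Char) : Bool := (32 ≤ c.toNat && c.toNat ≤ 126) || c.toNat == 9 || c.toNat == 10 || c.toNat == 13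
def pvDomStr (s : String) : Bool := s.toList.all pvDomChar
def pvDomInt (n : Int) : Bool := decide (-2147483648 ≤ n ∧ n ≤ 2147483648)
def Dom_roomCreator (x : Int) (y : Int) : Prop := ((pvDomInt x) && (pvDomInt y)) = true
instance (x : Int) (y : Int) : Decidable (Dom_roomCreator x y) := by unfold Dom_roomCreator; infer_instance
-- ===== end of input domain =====

-- B builds the grid row-by-row from two precomputed rows instead of A's per-cell
-- four-way branch; objective: simpler (same asymptotic cost).

-- ===== PORT A =====
def roomCreator (x : Int) (y : Int) : List (List String) :=
  (PySem.List.pyRange 0 y 1).foldl (fun room i =>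
    room ++ [(PySem.List.pyRange 0 x 1).foldl (fun temp j =>
      temp ++ [if j == 0 || j == x - 1 || i == 0 || i == y - 1 then "X" else " "]) []]) []

-- ===== PORT B =====
def roomCreator_alt (x : Int) (y : Int) : List (List String) :=
  if y ≤ 0 then [] else
  let border := List.replicate x.toNat "X"
  let interior := if x ≥ 2 then ["X"] ++ List.replicate (x - 2).toNat " " ++ ["X"] else border
  (PySem.List.pyRange 0 y 1).map (fun i => if i == 0 || i == y - 1 then border else interior)

-- ===== PRECONDITION & SPEC =====
def Spec_roomCreator (x : Int) (y : Int) (out : List (List String)) : Prop := out = roomCreator_alt x y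
instance (x : Int) (y : Int) (out : List (List String)) : Decidable (Spec_roomCreator x y out) := by unfold Spec_roomCreator; infer_instance

-- ===== CLAIM (what is proved, stated in full; the proofs are below) =====
def Claim_equal_roomCreator : Prop := ∀ (x : Int) (y : Int), Dom_roomCreator x y → Spec_roomCreator x y (roomCreator x y)

-- ===== LEMMAS AND PROOFS =====

-- A's inner loop is a map over the row range
theorem innerRow_eq_map (x : Int) (f : Int → String) :
    (PySem.List.pyRange 0 x 1).foldl (fun temp j => temp ++ [f j]) [] =
      (PySem.List.pyRange 0 x 1).map f := by
  simpa using PySem.List.foldl_append_singleton_eq_map (l := PySem.List.pyRange 0 x 1)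
    (f := f) (acc := [])

theorem row_const (x : Int) :
    (PySem.List.pyRange 0 x 1).map (fun _ => "X") = List.replicate x.toNat "X" := by
  rw [PySem.List.pyRange_one, List.map_map]
  simp [Function.comp_def]

theorem range_map_edge (m : Nat) :
    (List.range (m + 2)).map (fun (k : Nat) => if ((k : Int) == 0 || (k : Int) == (m : Int) + 1 : Bool) then "X" else " ")
      = ["X"] ++ List.replicate m " " ++ ["X"] := by
  rw [List.range_succ, List.map_append]
  rw [List.range_succ_eq_map, List.map_cons, List.map_map]
  have h1 : (List.range m).map ((fun (k : Nat) => if ((k : Int) == 0 || (k : Int) == (m : Int) + 1 : Bool) then "X" else " ") ∘ Nat.succ)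
      = List.replicate m " " := by
    rw [List.eq_replicate_iff]
    constructor
    · simp
    · intro s hs
      obtain ⟨k, hk, rfl⟩ := List.mem_map.mp hs
      have hk' : k < m := List.mem_range.mp hk
      simp only [Function.comp]
      simp
      omega
  rw [h1]
  have h2 : ((m + 1 : Nat) : Int) = (m : Int) + 1 := by push_cast; ring
  simp [h2]

theorem pyRange_zero_of_nonpos (x : Int) (hx : x ≤ 0) : PySem.List.pyRange 0 x 1 = [] := by
  rw [PySem.List.pyRange_one]
  have h : (x - 0).toNat = 0 := by omega
  rw [h]; rfl

theorem row_interior (x : Int) :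
    (PySem.List.pyRange 0 x 1).map (fun j => if j == 0 || j == x - 1 then "X" else " ")
      = (if x ≥ 2 then ["X"] ++ List.replicate (x - 2).toNat " " ++ ["X"]
         else List.replicate x.toNat "X") := by
  by_cases hx : x ≥ 2
  · rw [if_pos hx]
    obtain ⟨m, hm⟩ : ∃ m : Nat, x = (m : Int) + 2 := ⟨(x - 2).toNat, by omega⟩
    subst hm
    rw [PySem.List.pyRange_one, List.map_map]
    have hrange : ((m : Int) + 2 - 0).toNat = m + 2 := by omega
    have htn : ((m : Int) + 2 - 2).toNat = m := by omega
    rw [hrange, htn]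
    rw [← range_map_edge m]
    apply List.map_congr_left
    intro k _
    have h21 : (m : Int) + 2 - 1 = (m : Int) + 1 := by ring
    simp [h21]
  · rw [if_neg hx]
    have hx : x < 2 := by omega
    by_cases h0 : x ≤ 0
    · rw [pyRange_zero_of_nonpos x h0]
      have : x.toNat = 0 := by omega
      simp [this]
    · have hx1 : x = 1 := by omega
      subst hx1; decide



-- ===== VERDICT (by name: the statement is the Claim_ definition above) =====
theorem roomCreator_spec : Claim_equal_roomCreator := by
  intro x y _
  unfold Spec_roomCreator roomCreator roomCreator_alt
  by_cases hy : y ≤ 0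
  · rw [if_pos hy, pyRange_zero_of_nonpos y hy]; rfl
  rw [if_neg hy]
  rw [PySem.List.foldl_append_singleton_eq_map]
  simp only [List.nil_append]
  apply List.map_congr_left
  intro i _
  rw [innerRow_eq_map]
  by_cases hb : (i == 0 || i == y - 1) = true
  · rw [if_pos hb]
    have : (fun j => if j == 0 || j == x - 1 || i == 0 || i == y - 1 then "X" else " ")
        = (fun _ : Int => "X") := by
      funext j
      rcases Bool.or_eq_true_iff.mp hb with h | h <;> simp [h]
    rw [this, row_const]
  · rw [if_neg hb]
    have hb' : ¬ i = 0 ∧ ¬ i = y - 1 := by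
      by_contra h
      apply hb
      rcases not_and_or.mp h with h | h <;> simp at h <;> simp [h]
    have : (fun j => if j == 0 || j == x - 1 || i == 0 || i == y - 1 then "X" else " ")
        = (fun j : Int => if j == 0 || j == x - 1 then "X" else " ") := by
      funext j
      simp [hb'.1, hb'.2]
    rw [this, row_interior]
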